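-- pv_equiv track=rewrite | github.com/feli-santos/rl-iot-defense-system | scripts/separability_analysis.py | _find_keyword_features
-- ===== SOURCE A (Python) =====
-- from typing import Iterable
--
-- def _find_keyword_features(
--     feature_columns: Iterable[str],
--     keywords: Iterable[str],
-- ) -> list[str]:
--     """Find feature columns containing any keyword.
--
--     Args:
--         feature_columns: Available feature column names.
--         keywords: Keywords to search for.
--
--     Returns:
--         List of matching feature names.
--     """
--     lowered = [col.lower() for col in feature_columns]
--     matches = []
--     for original, lowered_col in zip(feature_columns, lowered):
--         if any(keyword in lowered_col for keyword in keywords):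
--             matches.append(original)
--     return matches
-- ===== SOURCE B (Python) =====
-- def _find_keyword_features(feature_columns, keywords):
--     """Find feature columns containing any keyword (explicit suffix/prefix scan)."""
--     kws = list(keywords)
--
--     def _hit(low):
--         # at every position of the lowered name, test each keyword as a prefix
--         for i in range(len(low) + 1):
--             for k in kws:
--                 if low.startswith(k, i):
--                     return True
--         return False
--
--     return [col for col in feature_columns if _hit(col.lower())]
-- ===== Notes on version B (the rewrite author's own statement) =====
-- stated objective: alternative
-- what changed: B replaces the precomputed lowered list + zip + accumulator loop with the builtin substring test by a filter whose match test explicitly scans every suffix of the lowered name and checks each keyword as a prefix (startswith), so no 'in' substring primitive and no parallel lists are used.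
import Mathlib
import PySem

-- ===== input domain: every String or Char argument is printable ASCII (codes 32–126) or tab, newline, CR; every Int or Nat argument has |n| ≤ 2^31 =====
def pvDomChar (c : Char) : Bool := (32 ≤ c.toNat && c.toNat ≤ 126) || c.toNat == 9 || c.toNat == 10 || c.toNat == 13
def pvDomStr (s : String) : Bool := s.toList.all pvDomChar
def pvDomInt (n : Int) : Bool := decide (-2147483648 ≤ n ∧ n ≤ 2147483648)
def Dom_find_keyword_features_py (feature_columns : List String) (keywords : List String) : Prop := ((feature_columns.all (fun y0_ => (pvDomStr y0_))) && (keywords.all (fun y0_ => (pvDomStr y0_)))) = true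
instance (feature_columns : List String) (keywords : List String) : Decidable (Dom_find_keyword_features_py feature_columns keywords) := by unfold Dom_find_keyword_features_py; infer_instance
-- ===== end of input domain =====

-- ===== PORT A =====
-- B differs from A only in how a match is detected (explicit suffix scan vs builtin substring test); return values proved equal.
-- the for-loop of A, step for step: walk zip(feature_columns, lowered), append matches
def aLoop (keywords : List String) : List (String × String) → List String → List String
  | [], acc => acc
  | (original, lowered_col) :: rest, acc =>
      aLoop keywords rest
        (if keywords.any (fun keyword => PySem.Str.isIn keyword lowered_col) then
          acc ++ [original] else acc)

def find_keyword_features_py (feature_columns : List String) (keywords : List String) : List String :=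
  let lowered := feature_columns.map PySem.Str.lower
  aLoop keywords (feature_columns.zip lowered) []

-- ===== PORT B =====
-- Source B's _hit: scan every suffix of the lowered column, test each keyword with startswith
def bHit (kws : List String) : List Char → Bool
  | [] => kws.any (fun k => PySem.Chars.startswith [] k.toList)
  | c :: t => kws.any (fun k => PySem.Chars.startswith (c :: t) k.toList) || bHit kws t

def find_keyword_features_py_alt (feature_columns : List String) (keywords : List String) : List String :=
  let kws := keywords
  feature_columns.filter (fun col => bHit kws (PySem.Str.lower col).toList)

-- ===== PRECONDITION & SPEC =====

def Spec_find_keyword_features_py (feature_columns : List String) (keywords : List String) (out : List String) : Prop := out = find_keyword_features_py_alt feature_columns keywords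
instance (feature_columns : List String) (keywords : List String) (out : List String) : Decidable (Spec_find_keyword_features_py feature_columns keywords out) := by unfold Spec_find_keyword_features_py; infer_instance

-- ===== CLAIM (what is proved, stated in full; the proofs are below) =====
def Claim_equal_find_keyword_features_py : Prop := ∀ (feature_columns : List String) (keywords : List String), Dom_find_keyword_features_py feature_columns keywords → Spec_find_keyword_features_py feature_columns keywords (find_keyword_features_py feature_columns keywords)

-- ===== LEMMAS AND PROOFS =====

-- B's suffix scan finds a keyword iff some keyword is an infix of the string
theorem bHit_iff (kws : List String) (l : List Char) :
    bHit kws l = true ↔ ∃ k ∈ kws, k.toList <:+: l := by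
  induction l with
  | nil =>
      simp [bHit, List.any_eq_true, PySem.Chars.startswith_iff, List.prefix_nil,
        List.infix_nil]
  | cons c t ih =>
      simp only [bHit, Bool.or_eq_true, List.any_eq_true, PySem.Chars.startswith_iff, ih]
      constructor
      · rintro (⟨k, hk, h⟩ | ⟨k, hk, h⟩)
        · exact ⟨k, hk, h.isInfix⟩
        · exact ⟨k, hk, List.infix_cons h⟩
      · rintro ⟨k, hk, h⟩
        rcases List.infix_cons_iff.mp h with h | h
        · exact Or.inl ⟨k, hk, h⟩
        · exact Or.inr ⟨k, hk, h⟩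

-- A's match condition equals B's match condition
theorem cond_eq (kws : List String) (l : List Char) :
    kws.any (fun k => PySem.Chars.isIn k.toList l) = bHit kws l := by
  rcases h : bHit kws l with _ | _
  · simp only [List.any_eq_false]
    intro k hk
    rw [Bool.not_eq_true, PySem.Chars.isIn_eq_false_iff]
    intro hinf
    exact absurd ((bHit_iff kws l).mpr ⟨k, hk, hinf⟩) (by simp [h])
  · rcases (bHit_iff kws l).mp h with ⟨k, hk, hinf⟩
    refine List.any_eq_true.mpr ⟨k, hk, ?_⟩
    exact (PySem.Chars.isIn_iff_infix _ _).mpr hinf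

-- the accumulator only prepends
theorem aLoop_acc (kws : List String) (l : List (String × String)) (acc : List String) :
    aLoop kws l acc = acc ++ aLoop kws l [] := by
  induction l generalizing acc with
  | nil => simp [aLoop]
  | cons p rest ih =>
      obtain ⟨o, lc⟩ := p
      simp only [aLoop]
      split
      · rw [ih (acc ++ [o]), ih ([] ++ [o])]; simp
      · exact ih acc

theorem main_eq (cols kws : List String) :
    aLoop kws (cols.zip (cols.map PySem.Str.lower)) []
      = cols.filter (fun col => bHit kws (PySem.Str.lower col).toList) := by
  induction cols with
  | nil => simp [aLoop]
  | cons c rest ih =>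
      simp only [List.map_cons, List.zip_cons_cons, aLoop, List.filter_cons,
        PySem.Str.isIn_eq]
      simp only [cond_eq kws (PySem.Str.lower c).toList]
      split
      · rw [aLoop_acc]; simp [ih]
      · simpa using ih

-- ===== VERDICT (by name: the statement is the Claim_ definition above) =====
theorem find_keyword_features_py_spec : Claim_equal_find_keyword_features_py := by
  intro cols kws _
  show find_keyword_features_py cols kws = find_keyword_features_py_alt cols kws
  simp only [find_keyword_features_py, find_keyword_features_py_alt]
  exact main_eq cols kws
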